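-- pv_equiv track=rewrite | github.com/YeQ456/Python-Examples | 进阶/例246.矩阵找数.py | findingNumber
-- ===== SOURCE A (Python) =====
-- def findingNumber(mat):
--     hashSet = {}
--     n = len(mat)
--     for mati in mat:
--         vis = {}
--         for x in mati:
--             vis[x] = 1
--         for key in vis:
--             if key not in hashSet:
--                 hashSet[key] = 0
--             hashSet[key] += 1
--     ans = 100001
--     for i in hashSet:
--         if hashSet[i] == n:
--             ans = min(i, ans)
--     return -1 if ans == 100001 else ans
-- ===== SOURCE B (Python) =====
-- def findingNumber(mat):
--     if not mat:
--         return -1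
--     common = set(mat[0])
--     for row in mat[1:]:
--         common &= set(row)
--     ans = 100001
--     for i in common:
--         ans = min(i, ans)
--     return -1 if ans == 100001 else ans
-- ===== Notes on version B (the rewrite author's own statement) =====
-- stated objective: simpler
-- what changed: Replaces the per-value row-occurrence counter dict (count==len(mat) test over all distinct values) with a shrinking set intersection reduced over the rows; A's 100001-sentinel min-tail is kept verbatim.
import Mathlib
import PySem

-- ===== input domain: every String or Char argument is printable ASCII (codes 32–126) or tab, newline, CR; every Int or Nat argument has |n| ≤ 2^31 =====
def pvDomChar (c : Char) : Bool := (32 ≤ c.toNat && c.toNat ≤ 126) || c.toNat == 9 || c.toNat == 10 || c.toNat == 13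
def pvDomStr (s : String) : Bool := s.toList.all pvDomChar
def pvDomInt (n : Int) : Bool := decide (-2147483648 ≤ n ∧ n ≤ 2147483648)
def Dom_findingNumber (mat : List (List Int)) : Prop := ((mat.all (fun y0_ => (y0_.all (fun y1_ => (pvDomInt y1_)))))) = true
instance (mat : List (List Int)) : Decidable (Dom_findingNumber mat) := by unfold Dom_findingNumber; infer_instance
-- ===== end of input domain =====

-- B replaces A's per-value row-occurrence counter dict with a shrinking set
-- intersection over the rows (objective: simpler); A's sentinel min-tail is kept.


-- ===== PORT A =====
def findingNumber (mat : List (List Int)) : Int :=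
  let hashSet : PySem.Dict Int Int :=
    mat.foldl (fun hs mati =>
      let vis : PySem.Dict Int Int :=
        mati.foldl (fun v x => v.insert x 1) PySem.Dict.empty
      vis.keys.foldl (fun hs key =>
        let hs' := if hs.contains key then hs else hs.insert key 0
        hs'.modify key 0 (· + 1)) hs) PySem.Dict.empty
  let n : Int := mat.length
  let ans : Int :=
    hashSet.keys.foldl (fun ans i =>
      if hashSet.getD i 0 = n then min i ans else ans) 100001
  if ans = 100001 then -1 else ans

-- ===== PORT B =====
def findingNumber_alt (mat : List (List Int)) : Int :=
  match mat with
  | [] => -1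
  | r :: rs =>
    let common : PySem.Set Int :=
      rs.foldl (fun c row => PySem.Set.inter c (PySem.Set.ofList row)) (PySem.Set.ofList r)
    let ans : Int := common.foldl (fun ans i => min i ans) 100001
    if ans = 100001 then -1 else ans

-- ===== PRECONDITION & SPEC =====
def Spec_findingNumber (mat : List (List Int)) (out : Int) : Prop := out = findingNumber_alt mat
instance (mat : List (List Int)) (out : Int) : Decidable (Spec_findingNumber mat out) := by unfold Spec_findingNumber; infer_instance

-- ===== CLAIM (what is proved, stated in full; the proofs are below) =====
def Claim_equal_findingNumber : Prop := ∀ (mat : List (List Int)), Dom_findingNumber mat → Spec_findingNumber mat (findingNumber mat)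

-- ===== LEMMAS AND PROOFS =====

-- the min-fold: basic bounds and membership
theorem fmin_le_init (c : Int) (l : List Int) :
    l.foldl (fun a i => min i a) c ≤ c := by
  induction l generalizing c with
  | nil => simp
  | cons x l ih =>
    simp only [List.foldl_cons]
    exact le_trans (ih (min x c)) (min_le_right _ _)

theorem fmin_le_mem {x : Int} {l : List Int} (c : Int) (h : x ∈ l) :
    l.foldl (fun a i => min i a) c ≤ x := by
  induction l generalizing c with
  | nil => cases h
  | cons y l ih =>
    simp only [List.foldl_cons]
    rcases List.mem_cons.mp h with rfl | h'
    · exact le_trans (fmin_le_init _ _) (min_le_left _ _)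
    · exact ih _ h'

theorem fmin_mem_or (c : Int) (l : List Int) :
    l.foldl (fun a i => min i a) c = c ∨ l.foldl (fun a i => min i a) c ∈ l := by
  induction l generalizing c with
  | nil => exact Or.inl rfl
  | cons x l ih =>
    simp only [List.foldl_cons]
    rcases ih (min x c) with h | h
    · rcases min_choice x c with hm | hm
      · exact Or.inr (by rw [h, hm]; exact List.mem_cons_self)
      · exact Or.inl (by rw [h, hm])
    · exact Or.inr (List.mem_cons_of_mem _ h)

theorem fmin_congr (c : Int) {l₁ l₂ : List Int} (h : ∀ x, x ∈ l₁ ↔ x ∈ l₂) :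
    l₁.foldl (fun a i => min i a) c = l₂.foldl (fun a i => min i a) c := by
  apply le_antisymm
  · rcases fmin_mem_or c l₂ with h2 | h2
    · rw [h2]; exact fmin_le_init _ _
    · exact fmin_le_mem _ ((h _).mpr h2)
  · rcases fmin_mem_or c l₁ with h1 | h1
    · rw [h1]; exact fmin_le_init _ _
    · exact fmin_le_mem _ ((h _).mp h1)

-- a guarded fold is a fold over the filtered list (bridge for List.foldl_filter's Bool predicate)
theorem foldl_ite_filter {α β : Type} (p : β → Prop) [DecidablePred p] (f : α → β → α)
    (l : List β) (init : α) :
    l.foldl (fun a b => if p b then f a b else a) init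
      = (l.filter (fun b => decide (p b))).foldl f init := by
  rw [List.foldl_filter]
  simp only [decide_eq_true_eq]

-- A's inner per-row step, abbreviated
def rowStep (hs : PySem.Dict Int Int) (K : List Int) : PySem.Dict Int Int :=
  K.foldl (fun hs key =>
    let hs' := if hs.contains key then hs else hs.insert key 0
    hs'.modify key 0 (· + 1)) hs

theorem getD_rowStep (hs : PySem.Dict Int Int) (K : List Int) (v : Int) :
    (rowStep hs K).getD v 0 = hs.getD v 0 + K.count v := by
  induction K generalizing hs with
  | nil => simp [rowStep]
  | cons k K ih =>
    simp only [rowStep, List.foldl_cons] at *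
    rw [ih]
    have hstep : ((if hs.contains k then hs else hs.insert k 0).modify k 0 (· + 1)).getD v 0
        = if v = k then hs.getD v 0 + 1 else hs.getD v 0 := by
      rw [PySem.Dict.getD_modify]
      split_ifs with h1 h2 h2 <;>
        simp_all [PySem.Dict.getD_insert, PySem.Dict.getD_of_not_contains]
    rw [hstep, List.count_cons]
    by_cases h : v = k <;> simp [h] <;> omega

theorem contains_rowStep (hs : PySem.Dict Int Int) (K : List Int) (v : Int) :
    (rowStep hs K).contains v = true ↔ hs.contains v = true ∨ v ∈ K := by
  induction K generalizing hs with
  | nil => simp [rowStep]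
  | cons k K ih =>
    simp only [rowStep, List.foldl_cons] at *
    rw [ih]
    have hstep : ((if hs.contains k then hs else hs.insert k 0).modify k 0 (· + 1)).contains v
        = ((v == k) || hs.contains v) := by
      rw [PySem.Dict.contains_modify]
      split_ifs with h1
      · rfl
      · rw [PySem.Dict.contains_insert]
        cases hvk : (v == k) <;> simp
    rw [hstep]
    simp only [List.mem_cons, Bool.or_eq_true, beq_iff_eq]
    tauto

-- A's whole counting loop
def buildA (mat : List (List Int)) : PySem.Dict Int Int :=
  mat.foldl (fun hs mati =>
    let vis : PySem.Dict Int Int :=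
      mati.foldl (fun v x => v.insert x 1) PySem.Dict.empty
    vis.keys.foldl (fun hs key =>
      let hs' := if hs.contains key then hs else hs.insert key 0
      hs'.modify key 0 (· + 1)) hs) PySem.Dict.empty

theorem vis_keys (mati : List Int) :
    (mati.foldl (fun v x => v.insert x (1 : Int)) PySem.Dict.empty).keys
      = PySem.Set.ofList mati := by
  rw [PySem.Dict.keys_foldl_insert]
  simp [PySem.Set.update_nil_left]

theorem getD_buildA (mat : List (List Int)) (v : Int) :
    (buildA mat).getD v 0 = (mat.countP (fun row => decide (v ∈ row)) : Int) := by
  suffices h : ∀ (hs : PySem.Dict Int Int),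
      (mat.foldl (fun hs mati =>
        let vis : PySem.Dict Int Int :=
          mati.foldl (fun v x => v.insert x 1) PySem.Dict.empty
        vis.keys.foldl (fun hs key =>
          let hs' := if hs.contains key then hs else hs.insert key 0
          hs'.modify key 0 (· + 1)) hs) hs).getD v 0
      = hs.getD v 0 + (mat.countP (fun row => decide (v ∈ row)) : Int) by
    simpa [buildA] using h PySem.Dict.empty
  induction mat with
  | nil => simp
  | cons r rs ih =>
    intro hs
    simp only [List.foldl_cons]
    rw [ih, vis_keys]
    have : (rowStep hs (PySem.Set.ofList r)).getD v 0 = hs.getD v 0 + (PySem.Set.ofList r).count v :=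
      getD_rowStep hs _ v
    simp only [rowStep] at this
    rw [this, List.countP_cons]
    have hcount : ((PySem.Set.ofList r).count v : Int) = if v ∈ r then 1 else 0 := by
      split_ifs with hm
      · rw [List.count_eq_one_of_mem (PySem.Set.nodup_ofList r) ((PySem.Set.mem_ofList r v).mpr hm)]
        norm_num
      · rw [List.count_eq_zero.mpr (fun h => hm ((PySem.Set.mem_ofList r v).mp h))]
        norm_num
    rw [hcount]
    by_cases hm : v ∈ r <;> simp [hm] <;> omega

theorem contains_buildA (mat : List (List Int)) (v : Int) :
    (buildA mat).contains v = true ↔ ∃ row ∈ mat, v ∈ row := by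
  suffices h : ∀ (hs : PySem.Dict Int Int),
      ((mat.foldl (fun hs mati =>
        let vis : PySem.Dict Int Int :=
          mati.foldl (fun v x => v.insert x 1) PySem.Dict.empty
        vis.keys.foldl (fun hs key =>
          let hs' := if hs.contains key then hs else hs.insert key 0
          hs'.modify key 0 (· + 1)) hs) hs).contains v = true)
      ↔ (hs.contains v = true ∨ ∃ row ∈ mat, v ∈ row) by
    rw [show (buildA mat) = _ from rfl]
    rw [buildA, h PySem.Dict.empty]
    simp [PySem.Dict.contains_empty]
  induction mat with
  | nil => simp
  | cons r rs ih =>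
    intro hs
    simp only [List.foldl_cons]
    rw [ih, vis_keys]
    have := contains_rowStep hs (PySem.Set.ofList r) v
    simp only [rowStep] at this
    rw [this, PySem.Set.mem_ofList]
    simp only [List.mem_cons]
    constructor
    · rintro ((h | h) | ⟨row, hr, hv⟩)
      · exact Or.inl h
      · exact Or.inr ⟨r, Or.inl rfl, h⟩
      · exact Or.inr ⟨row, Or.inr hr, hv⟩
    · rintro (h | ⟨row, (rfl | hr), hv⟩)
      · exact Or.inl (Or.inl h)
      · exact Or.inl (Or.inr hv)
      · exact Or.inr ⟨row, hr, hv⟩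

-- B's intersection set membership
theorem mem_commonB (r : List Int) (rs : List (List Int)) (v : Int) :
    v ∈ rs.foldl (fun c row => PySem.Set.inter c (PySem.Set.ofList row)) (PySem.Set.ofList r)
      ↔ (v ∈ r ∧ ∀ row ∈ rs, v ∈ row) := by
  suffices h : ∀ (c : PySem.Set Int),
      v ∈ rs.foldl (fun c row => PySem.Set.inter c (PySem.Set.ofList row)) c
        ↔ (v ∈ c ∧ ∀ row ∈ rs, v ∈ row) by
    rw [h, PySem.Set.mem_ofList]
  induction rs with
  | nil => simp
  | cons row rs ih =>
    intro c
    simp only [List.foldl_cons]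
    rw [ih, PySem.Set.mem_inter, PySem.Set.mem_ofList]
    simp only [List.mem_cons]
    constructor
    · rintro ⟨⟨h1, h2⟩, h3⟩
      exact ⟨h1, fun s hs => by rcases hs with rfl | hs; exact h2; exact h3 s hs⟩
    · rintro ⟨h1, h2⟩
      exact ⟨⟨h1, h2 row (Or.inl rfl)⟩, fun s hs => h2 s (Or.inr hs)⟩

-- countP = length ↔ all rows contain v (for the candidate test)
theorem count_full_iff (mat : List (List Int)) (v : Int) :
    ((mat.countP (fun row => decide (v ∈ row)) : Int) = (mat.length : Int))
      ↔ ∀ row ∈ mat, v ∈ row := by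
  rw [Int.ofNat_inj]
  rw [List.countP_eq_length]
  simp

-- ===== VERDICT (by name: the statement is the Claim_ definition above) =====
theorem findingNumber_spec : Claim_equal_findingNumber := by
  intro mat _
  unfold Spec_findingNumber
  cases mat with
  | nil => decide
  | cons r rs =>
    show findingNumber (r :: rs) = findingNumber_alt (r :: rs)
    rw [findingNumber, findingNumber_alt]
    simp only []
    have hfold :
        ((buildA (r :: rs)).keys.foldl (fun ans i =>
            if (buildA (r :: rs)).getD i 0 = ((r :: rs).length : Int) then min i ans else ans) 100001)
        = (rs.foldl (fun c row => PySem.Set.inter c (PySem.Set.ofList row))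
            (PySem.Set.ofList r)).foldl (fun ans i => min i ans) 100001 := by
      rw [foldl_ite_filter (fun i => (buildA (r :: rs)).getD i 0 = ((r :: rs).length : Int))
            (fun ans i => min i ans)]
      apply fmin_congr
      intro x
      rw [List.mem_filter, mem_commonB]
      rw [decide_eq_true_iff, getD_buildA, count_full_iff]
      constructor
      · rintro ⟨_, hall⟩
        exact ⟨hall r List.mem_cons_self, fun row hr => hall row (List.mem_cons_of_mem _ hr)⟩
      · rintro ⟨hr, hrs⟩
        have hall : ∀ row ∈ r :: rs, x ∈ row := by
          intro row h; rcases List.mem_cons.mp h with rfl | h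
          · exact hr
          · exact hrs row h
        refine ⟨?_, hall⟩
        rw [← PySem.Dict.contains_iff_mem_keys, contains_buildA]
        exact ⟨r, List.mem_cons_self, hr⟩
    exact hfold ▸ rfl
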